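-- pv_equiv track=rewrite | github.com/sara-bouchenak/TITANIA | src/TITANIA/result_statistics/utils.py | compute_metrics_name_dict
-- ===== SOURCE A (Python) =====
-- def compute_metrics_name_dict(columns: list):
--
--     other_columns = {}
--     other_columns["info"] = []
--     if "round" in columns:
--         other_columns["info"].append("round")
--     if "source" in columns:
--         other_columns["info"].append("source")
--
--     all_utility_metrics = ['accuracy', 'precision', 'recall', 'f1', 'loss', "training_loss"]
--     utility_metrics_list = [column for column in columns if column in all_utility_metrics]
--
--     all_fairness_metrics = ['disparate_impact', 'discr_index', 'eod', 'avg_odds', 'spd']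
--     bias_metrics_dict = {}
--     for column in columns:
--         if ('_').join(column.split('_')[1:]) in all_fairness_metrics:
--             sens_attr = column.split('_')[0]
--             if sens_attr not in bias_metrics_dict.keys():
--                 bias_metrics_dict[sens_attr] = [column]
--             else:
--                 bias_metrics_dict[sens_attr].append(column)
--
--     bias_metrics_list = [bias_metric for sublist in bias_metrics_dict.values() for bias_metric in sublist]
--
--     other_columns["method_pars"] = []
--     for column in columns:
--         if column not in utility_metrics_list + bias_metrics_list + other_columns["info"]:
--             other_columns["method_pars"].append(column)
--
--     metrics_by_cat = bias_metrics_dict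
--     metrics_by_cat["utility"] = utility_metrics_list
--     delete_key = [key for key, val in metrics_by_cat.items() if val == []]
--     for key in delete_key:
--         del metrics_by_cat[key]
--
--     return metrics_by_cat, other_columns
-- ===== SOURCE B (Python) =====
-- def compute_metrics_name_dict(columns: list):
--     # One pass over columns classifies each column directly; finalization adds/removes
--     # the "utility" key instead of a generic empty-value sweep.
--     info = []
--     if "round" in columns:
--         info.append("round")
--     if "source" in columns:
--         info.append("source")
--
--     all_utility_metrics = ['accuracy', 'precision', 'recall', 'f1', 'loss', "training_loss"]
--     all_fairness_metrics = ['disparate_impact', 'discr_index', 'eod', 'avg_odds', 'spd']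
--
--     utility_list = []
--     bias = {}
--     method_pars = []
--     for col in columns:
--         if col in all_utility_metrics:
--             utility_list.append(col)
--         elif '_'.join(col.split('_')[1:]) in all_fairness_metrics:
--             bias.setdefault(col.split('_')[0], []).append(col)
--         elif col not in ("round", "source"):
--             method_pars.append(col)
--
--     if utility_list:
--         bias["utility"] = utility_list
--     else:
--         bias.pop("utility", None)
--
--     return bias, {"info": info, "method_pars": method_pars}
-- ===== Notes on version B (the rewrite author's own statement) =====
-- stated objective: simpler
-- what changed: Replaces A's three independent passes (utility comprehension, bias loop, method_pars loop that re-scans a concatenated list) and the generic delete-empty-keys sweep by one classifying pass over columns plus a direct add-or-drop of the 'utility' key.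
import Mathlib
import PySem

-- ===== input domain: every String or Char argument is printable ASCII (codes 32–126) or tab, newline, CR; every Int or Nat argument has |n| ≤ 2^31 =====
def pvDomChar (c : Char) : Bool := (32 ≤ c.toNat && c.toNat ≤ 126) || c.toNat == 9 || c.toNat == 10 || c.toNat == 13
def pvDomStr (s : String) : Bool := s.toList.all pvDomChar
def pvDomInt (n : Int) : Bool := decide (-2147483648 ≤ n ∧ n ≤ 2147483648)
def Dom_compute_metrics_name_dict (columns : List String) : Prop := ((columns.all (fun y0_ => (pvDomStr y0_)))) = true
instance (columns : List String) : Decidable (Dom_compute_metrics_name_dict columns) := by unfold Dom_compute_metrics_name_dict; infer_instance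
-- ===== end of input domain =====

-- B replaces A's three independent passes (plus a generic empty-value sweep) by one
-- classifying pass over columns and a direct add-or-drop of the "utility" key (objective: simpler).

-- ===== PORT A =====
-- shared literal constants and the '_'-prefix/suffix expressions both Pythons contain verbatim
def all_utility_metrics : List String := ["accuracy", "precision", "recall", "f1", "loss", "training_loss"]
def all_fairness_metrics : List String := ["disparate_impact", "discr_index", "eod", "avg_odds", "spd"]
-- column.split('_'): the separator "_" is nonempty, so split? is exact (never none)
def pySplitUS (c : String) : List String := (PySem.Str.split? c "_").getD []
-- '_'.join(column.split('_')[1:])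
def pySuffix (c : String) : String := PySem.Str.join "_" (PySem.List.slice (pySplitUS c) (some 1) none)
-- column.split('_')[0]  (split with a separator never returns an empty list, so index 0 is in range)
def pyPrefix (c : String) : String := PySem.List.pyGetD (pySplitUS c) 0 ""
-- other_columns["info"]: [] plus "round" / "source" appended when present
def infoL (columns : List String) : List String :=
  (if "round" ∈ columns then ["round"] else []) ++ (if "source" ∈ columns then ["source"] else [])

-- body of A's bias-dict loop
def biasStep (d : PySem.Dict String (List String)) (column : String) : PySem.Dict String (List String) :=
  if all_fairness_metrics.contains (pySuffix column) then
    if d.contains (pyPrefix column) = false then d.insert (pyPrefix column) [column]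
    else d.insert (pyPrefix column) (d.getD (pyPrefix column) [] ++ [column])
  else d

def compute_metrics_name_dict (columns : List String) :
    (List (String × List String)) × (List (String × List String)) :=
  let info := infoL columns
  let utility_metrics_list := columns.filter (fun column => all_utility_metrics.contains column)
  let bias_metrics_dict := columns.foldl biasStep PySem.Dict.empty
  let bias_metrics_list := bias_metrics_dict.values.flatten
  let method_pars := columns.filter
    (fun column => !((utility_metrics_list ++ bias_metrics_list ++ info).contains column))
  let metrics_by_cat := bias_metrics_dict.insert "utility" utility_metrics_list
  let delete_key := (metrics_by_cat.items.filter (fun p => p.2 == ([] : List String))).map (·.1)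
  let metrics_by_cat := delete_key.foldl (fun d k => d.erase k) metrics_by_cat
  (metrics_by_cat.items, [("info", info), ("method_pars", method_pars)])

-- ===== PORT B =====
-- body of B's single classifying loop over (utility_list, bias, method_pars)
def altStep (st : List String × PySem.Dict String (List String) × List String) (col : String) :
    List String × PySem.Dict String (List String) × List String :=
  if all_utility_metrics.contains col then (st.1 ++ [col], st.2.1, st.2.2)
  else if all_fairness_metrics.contains (pySuffix col) then
    (st.1, st.2.1.modify (pyPrefix col) [] (· ++ [col]), st.2.2)
  else if col == "round" || col == "source" then st
  else (st.1, st.2.1, st.2.2 ++ [col])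

def compute_metrics_name_dict_alt (columns : List String) :
    (List (String × List String)) × (List (String × List String)) :=
  let info := infoL columns
  let st := columns.foldl altStep ([], PySem.Dict.empty, [])
  let bias := if st.1 = [] then st.2.1.erase "utility" else st.2.1.insert "utility" st.1
  (bias.items, [("info", info), ("method_pars", st.2.2)])

-- ===== PRECONDITION & SPEC =====
def Spec_compute_metrics_name_dict (columns : List String) (out : (List (String × List String)) × (List (String × List String))) : Prop := out = compute_metrics_name_dict_alt columns
instance (columns : List String) (out : (List (String × List String)) × (List (String × List String))) : Decidable (Spec_compute_metrics_name_dict columns out) := by unfold Spec_compute_metrics_name_dict; infer_instance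

-- ===== CLAIM (what is proved, stated in full; the proofs are below) =====
def Claim_equal_compute_metrics_name_dict : Prop := ∀ (columns : List String), Dom_compute_metrics_name_dict columns → Spec_compute_metrics_name_dict columns (compute_metrics_name_dict columns)

-- ===== LEMMAS AND PROOFS =====

def utilB (c : String) : Bool := all_utility_metrics.contains c
def fairB (c : String) : Bool := all_fairness_metrics.contains (pySuffix c)
def mpPredB (c : String) : Bool := !utilB c && !fairB c && !(c == "round" || c == "source")
def dstep (d : PySem.Dict String (List String)) (c : String) : PySem.Dict String (List String) :=
  if fairB c then d.modify (pyPrefix c) [] (· ++ [c]) else d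
def biasD (columns : List String) : PySem.Dict String (List String) :=
  columns.foldl dstep PySem.Dict.empty

lemma util_not_fair (c : String) (h : utilB c = true) : fairB c = false := by
  simp [utilB, all_utility_metrics] at h
  rcases h with rfl | rfl | rfl | rfl | rfl | rfl <;> decide

lemma biasStep_eq_dstep : biasStep = dstep := by
  funext d c
  by_cases hf : fairB c
  · by_cases hc : d.contains (pyPrefix c)
    · simp [biasStep, dstep, fairB] at hf ⊢
      simp [hf, hc, PySem.Dict.modify]
    · simp only [Bool.not_eq_true] at hc
      simp [biasStep, dstep, fairB] at hf ⊢
      simp [hf, hc, PySem.Dict.modify, PySem.Dict.getD_of_not_contains _ _ hc]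
  · simp only [Bool.not_eq_true] at hf
    simp [biasStep, dstep, fairB] at hf ⊢
    simp [hf]

lemma fold_split (columns : List String) (u m : List String) (d : PySem.Dict String (List String)) :
    columns.foldl altStep (u, d, m) =
      (u ++ columns.filter utilB, columns.foldl dstep d, m ++ columns.filter mpPredB) := by
  induction columns generalizing u d m with
  | nil => simp
  | cons c rest ih =>
    simp only [List.foldl_cons]
    by_cases hu : utilB c
    · have hf : fairB c = false := util_not_fair c hu
      have hu' : c ∈ all_utility_metrics := by simpa [utilB] using hu
      have hstep : altStep (u, d, m) c = (u ++ [c], d, m) := by simp [altStep, hu']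
      have hd : dstep d c = d := by simp [dstep, hf]
      have hmp : mpPredB c = false := by simp [mpPredB, hu]
      rw [hstep, hd, ih, List.filter_cons, List.filter_cons, hu, hmp]
      simp
    · simp only [Bool.not_eq_true] at hu
      by_cases hf : fairB c
      · have hu' : ¬ c ∈ all_utility_metrics := by simpa [utilB] using hu
        have hf' : pySuffix c ∈ all_fairness_metrics := by simpa [fairB] using hf
        have hstep : altStep (u, d, m) c = (u, d.modify (pyPrefix c) [] (· ++ [c]), m) := by
          simp [altStep, hu', hf']
        have hd : dstep d c = d.modify (pyPrefix c) [] (· ++ [c]) := by simp [dstep, hf]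
        have hmp : mpPredB c = false := by simp [mpPredB, hf]
        rw [hstep, hd, ih, List.filter_cons, List.filter_cons, hu, hmp]
        simp
      · simp only [Bool.not_eq_true] at hf
        have hd : dstep d c = d := by simp [dstep, hf]
        by_cases hr : (c == "round" || c == "source") = true
        · have hu' : ¬ c ∈ all_utility_metrics := by simpa [utilB] using hu
          have hf' : ¬ pySuffix c ∈ all_fairness_metrics := by simpa [fairB] using hf
          have hr' : c = "round" ∨ c = "source" := by simpa using hr
          have hstep : altStep (u, d, m) c = (u, d, m) := by
            simp [altStep, hu', hf', hr']
          have hmp : mpPredB c = false := by simp [mpPredB, hr]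
          rw [hstep, hd, ih, List.filter_cons, List.filter_cons, hu, hmp]
          simp
        · simp only [Bool.not_eq_true] at hr
          have hu' : ¬ c ∈ all_utility_metrics := by simpa [utilB] using hu
          have hf' : ¬ pySuffix c ∈ all_fairness_metrics := by simpa [fairB] using hf
          have hr' : ¬ (c = "round" ∨ c = "source") := by simpa using hr
          have hstep : altStep (u, d, m) c = (u, d, m ++ [c]) := by
            simp [altStep, hu', hf', hr']
          have hmp : mpPredB c = true := by simp [mpPredB, hu, hf, hr]
          rw [hstep, hd, ih, List.filter_cons, List.filter_cons, hu, hmp]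
          simp

-- the grouping fold, re-expressed over key/value pairs
def pairsOf (columns : List String) : List (String × String) :=
  (columns.filter fairB).map (fun c => (pyPrefix c, c))

lemma biasD_eq_pairs_fold (columns : List String) :
    biasD columns = (pairsOf columns).foldl (fun d p => d.modify p.1 [] (· ++ [p.2])) PySem.Dict.empty := by
  simp only [pairsOf, List.foldl_map, List.foldl_filter, biasD]
  rfl

lemma getD_biasD (columns : List String) (k : String) :
    (biasD columns).getD k [] =
      ((pairsOf columns).filter (fun p => p.1 == k)).map (·.2) := by
  rw [biasD_eq_pairs_fold]
  simp [PySem.Dict.getD_foldl_modify_append]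

lemma keys_biasD (columns : List String) (k : String) :
    k ∈ (biasD columns).keys ↔ k ∈ (columns.filter fairB).map pyPrefix := by
  rw [biasD_eq_pairs_fold]
  rw [PySem.Dict.keys_foldl_modify_key (pairsOf columns) Prod.fst [] (fun _ p => (· ++ [p.2]))]
  simp [PySem.Set.mem_update, pairsOf, List.map_map, Function.comp]

lemma nodup_keys_biasD (columns : List String) : (biasD columns).keys.Nodup := by
  rw [biasD_eq_pairs_fold]
  exact PySem.Dict.nodup_keys_foldl_modify_key (pairsOf columns) Prod.fst [] _ _
    PySem.Dict.nodup_keys_empty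

lemma mem_getD_biasD (columns : List String) (k x : String) :
    x ∈ (biasD columns).getD k [] ↔ x ∈ columns ∧ fairB x = true ∧ pyPrefix x = k := by
  rw [getD_biasD]
  simp only [pairsOf, List.mem_map, List.mem_filter, beq_iff_eq]
  constructor
  · rintro ⟨p, hp, rfl⟩
    rcases hp with ⟨hp1, hp2⟩
    rcases hp1 with ⟨c, hc, rfl⟩
    rcases hc with ⟨hcm, hcf⟩
    exact ⟨hcm, hcf, hp2⟩
  · rintro ⟨hx, hf, rfl⟩
    exact ⟨(pyPrefix x, x), ⟨⟨x, ⟨hx, hf⟩, rfl⟩, rfl⟩, rfl⟩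

lemma mem_flatten_biasD (columns : List String) (x : String) :
    x ∈ (biasD columns).values.flatten ↔ x ∈ columns ∧ fairB x = true := by
  rw [PySem.Dict.values_eq_map_keys _ (nodup_keys_biasD columns) []]
  simp only [List.mem_flatten, List.mem_map]
  constructor
  · rintro ⟨l, ⟨k, hk, rfl⟩, hx⟩
    have := (mem_getD_biasD columns k x).mp hx
    exact ⟨this.1, this.2.1⟩
  · rintro ⟨hx, hf⟩
    refine ⟨(biasD columns).getD (pyPrefix x) [], ⟨pyPrefix x, ?_, rfl⟩,
      (mem_getD_biasD columns (pyPrefix x) x).mpr ⟨hx, hf, rfl⟩⟩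
    exact (keys_biasD columns _).mpr (List.mem_map.mpr ⟨x, List.mem_filter.mpr ⟨hx, hf⟩, rfl⟩)

lemma values_biasD_ne_nil (columns : List String) :
    ∀ v ∈ (biasD columns).values, v ≠ [] := by
  intro v hv
  rw [PySem.Dict.values_eq_map_keys _ (nodup_keys_biasD columns) []] at hv
  rcases List.mem_map.mp hv with ⟨k, hk, rfl⟩
  rcases List.mem_map.mp ((keys_biasD columns k).mp hk) with ⟨c, hc, rfl⟩
  have hc' := List.mem_filter.mp hc
  have : c ∈ (biasD columns).getD (pyPrefix c) [] :=
    (mem_getD_biasD columns (pyPrefix c) c).mpr ⟨hc'.1, hc'.2, rfl⟩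
  intro h; rw [h] at this; exact (List.not_mem_nil) this

lemma mem_infoL (columns : List String) (c : String) (hc : c ∈ columns) :
    c ∈ infoL columns ↔ c = "round" ∨ c = "source" := by
  unfold infoL
  constructor
  · intro h
    rcases List.mem_append.mp h with h | h <;> split at h <;> simp_all
  · rintro (rfl | rfl) <;> simp [hc]

-- every key/value entry equal to some key k erased once is erased for good
lemma erase_erase_self (d : PySem.Dict String (List String)) (k : String) :
    (d.erase k).erase k = d.erase k := by
  simp [PySem.Dict.erase, List.filter_filter]

lemma foldl_erase_all (l : List String) (d : PySem.Dict String (List String)) (k : String)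
    (h : ∀ x ∈ l, x = k) : l.foldl (fun d k => d.erase k) (d.erase k) = d.erase k := by
  induction l with
  | nil => rfl
  | cons x rest ih =>
    have hx := h x (by simp)
    subst hx
    simp only [List.foldl_cons, erase_erase_self]
    exact ih (fun y hy => h y (by simp [hy]))

lemma foldl_erase_const (l : List String) (d : PySem.Dict String (List String)) (k : String)
    (hall : ∀ x ∈ l, x = k) (hmem : k ∈ l) :
    l.foldl (fun d k => d.erase k) d = d.erase k := by
  cases l with
  | nil => simp at hmem
  | cons x rest =>
    have hx := hall x (by simp)
    subst hx
    simp only [List.foldl_cons]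
    exact foldl_erase_all rest d x (fun y hy => hall y (by simp [hy]))

lemma filter_map_key (l : List (String × List String)) (k : String) (v : List String) :
    (l.map (fun p => if (p.1 == k) = true then (k, v) else p)).filter (fun p => !(p.1 == k)) =
      l.filter (fun p => !(p.1 == k)) := by
  induction l with
  | nil => rfl
  | cons p rest ih =>
    by_cases hp : p.1 = k
    · simp only [List.map_cons, List.filter_cons]
      simp [hp]
      simpa using ih
    · simp only [List.map_cons, List.filter_cons]
      simp [hp]
      simpa using ih

lemma erase_insert_self (d : PySem.Dict String (List String)) (k : String) (v : List String) :
    (d.insert k v).erase k = d.erase k := by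
  by_cases hc : d.contains k
  · simp only [PySem.Dict.insert, PySem.Dict.erase, hc, if_true]
    exact congrArg PySem.Dict.mk (filter_map_key d.items k v)
  · simp only [Bool.not_eq_true] at hc
    simp [PySem.Dict.insert, PySem.Dict.erase, hc, List.filter_append]

-- final assembly: A's insert-then-sweep equals B's add-or-drop of "utility"
lemma final_eq (b : PySem.Dict String (List String)) (utl : List String)
    (hvals : ∀ v ∈ b.values, v ≠ []) :
    (let metrics := b.insert "utility" utl
     let delete_key := (metrics.items.filter (fun p => p.2 == ([] : List String))).map (·.1)
     delete_key.foldl (fun d k => d.erase k) metrics) =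
    (if utl = [] then b.erase "utility" else b.insert "utility" utl) := by
  by_cases hu : utl = []
  · subst hu
    simp only [if_true]
    have hmemx : ("utility", ([] : List String)) ∈ (b.insert "utility" []).items :=
      PySem.Dict.mem_items_of_get?_eq_some _ (PySem.Dict.get?_insert_self b "utility" [])
    have hmem : "utility" ∈ ((b.insert "utility" ([] : List String)).items.filter
        (fun p => p.2 == ([] : List String))).map (·.1) :=
      List.mem_map.mpr ⟨("utility", []), List.mem_filter.mpr ⟨hmemx, by simp⟩, rfl⟩
    have hall : ∀ x ∈ ((b.insert "utility" ([] : List String)).items.filter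
        (fun p => p.2 == ([] : List String))).map (·.1), x = "utility" := by
      intro x hx
      rcases List.mem_map.mp hx with ⟨p, hp, rfl⟩
      rcases List.mem_filter.mp hp with ⟨hpi, hpe⟩
      rcases (PySem.Dict.mem_items_insert b "utility" [] p).mp hpi with h | ⟨hpb, _⟩
      · rw [h]
      · exfalso
        exact hvals p.2 (List.mem_map.mpr ⟨p, hpb, rfl⟩) (by simpa using hpe)
    rw [foldl_erase_const _ _ _ hall hmem, erase_insert_self]
  · simp only [hu, if_false]
    have hnil : ((b.insert "utility" utl).items.filter (fun p => p.2 == ([] : List String))) = [] := by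
      rw [List.filter_eq_nil_iff]
      intro p hp
      rcases (PySem.Dict.mem_items_insert b "utility" utl p).mp hp with h | ⟨hpb, _⟩
      · subst h; simpa using hu
      · have := hvals p.2 (List.mem_map.mpr ⟨p, hpb, rfl⟩)
        simpa using this
    have hnil' : ((b.insert "utility" utl).items.filter (fun p => p.2.isEmpty)) = [] := by
      simpa using hnil
    simp [hnil']

-- ===== VERDICT (by name: the statement is the Claim_ definition above) =====
theorem compute_metrics_name_dict_spec : Claim_equal_compute_metrics_name_dict := by
  intro columns _
  unfold Spec_compute_metrics_name_dict compute_metrics_name_dict compute_metrics_name_dict_alt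
  rw [fold_split columns [] [] PySem.Dict.empty]
  simp only [List.nil_append, biasStep_eq_dstep]
  have hbias : columns.foldl dstep PySem.Dict.empty = biasD columns := rfl
  rw [hbias, show (fun column => all_utility_metrics.contains column) = utilB from rfl]
  have hmp : columns.filter
      (fun column => !(((columns.filter utilB) ++
        (biasD columns).values.flatten ++ infoL columns).contains column)) =
      columns.filter mpPredB := by
    apply List.filter_congr
    intro c hc
    have h1 : (columns.filter utilB).contains c = utilB c := by
      rw [Bool.eq_iff_iff]
      simp only [List.contains_iff_mem, List.mem_filter, utilB]
      exact ⟨fun h => h.2, fun h => ⟨hc, h⟩⟩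
    have h2 : ((biasD columns).values.flatten).contains c = fairB c := by
      rw [Bool.eq_iff_iff]
      simp only [List.contains_iff_mem, mem_flatten_biasD]
      exact ⟨fun h => h.2, fun h => ⟨hc, h⟩⟩
    have h3 : (infoL columns).contains c = (c == "round" || c == "source") := by
      rw [Bool.eq_iff_iff]
      simp only [List.contains_iff_mem, mem_infoL columns c hc]
      simp
    simp only [List.contains_append, h1, h2, h3, mpPredB, Bool.not_or, Bool.and_assoc]
  rw [hmp]
  have hfin := final_eq (biasD columns) (columns.filter utilB) (values_biasD_ne_nil columns)
  simp only [] at hfin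
  rw [hfin]
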